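-- pv_equiv track=rewrite | github.com/RBlasser/alpha_challenge | mod_prepago/test_proc.py | update_bal
-- ===== SOURCE A (Python) =====
-- def update_bal(vector, bal0):
--     bal = bal0
--     res = []
--     for i in range(len(vector)):
--         bal = bal - vector[i]
--         if bal < 0:
--             res.append(i)
--             break
--
--     return res[0]
-- ===== SOURCE B (Python) =====
-- def update_bal(vector, bal0):
--     # Build the prefix-sum table, then pick the first index whose cumulative sum exceeds bal0.
--     sums = []
--     total = 0
--     for x in vector:
--         total += x
--         sums.append(total)
--     return [i for i, s in enumerate(sums) if s > bal0][0]
-- ===== Notes on version B (the rewrite author's own statement) =====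
-- stated objective: alternative
-- what changed: Replaces the running-balance loop with early break by a prefix-sum table built first and a comprehension selecting the crossing indices, returning the first.
import Mathlib
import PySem

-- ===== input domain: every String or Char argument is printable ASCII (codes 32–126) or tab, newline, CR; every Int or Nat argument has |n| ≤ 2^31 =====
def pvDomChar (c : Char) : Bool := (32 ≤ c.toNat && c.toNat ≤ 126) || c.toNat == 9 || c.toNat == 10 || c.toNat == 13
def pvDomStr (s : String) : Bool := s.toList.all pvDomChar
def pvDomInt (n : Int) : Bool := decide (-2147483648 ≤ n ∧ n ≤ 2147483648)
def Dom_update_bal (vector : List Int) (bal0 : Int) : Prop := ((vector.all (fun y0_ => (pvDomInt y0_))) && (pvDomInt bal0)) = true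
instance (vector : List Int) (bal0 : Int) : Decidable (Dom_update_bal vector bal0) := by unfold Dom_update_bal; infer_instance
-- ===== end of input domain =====

-- B builds a prefix-sum table first and returns the first crossing index (alternative decomposition, same cost).


-- ===== PORT A =====
-- the for-loop over range(len(vector)) with running bal, appending i and breaking
def pvLoopA : List Int → Int → Int → List Int
  | [], _, _ => []
  | x :: xs, bal, i => if bal - x < 0 then [i] else pvLoopA xs (bal - x) (i + 1)

-- res[0] raises IndexError when res = []; Pre_ excludes that, so the default is never claimed
def update_bal (vector : List Int) (bal0 : Int) : Int :=
  (PySem.List.pyGet? (pvLoopA vector bal0 0) 0).getD 0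

-- ===== PORT B =====
-- the first pass of Source B: sums.append(total) with total += x
def pvPrefixSums : List Int → Int → List Int
  | [], _ => []
  | x :: xs, t => (t + x) :: pvPrefixSums xs (t + x)

-- [i for i, s in enumerate(sums) if s > bal0][0]; same IndexError corner excluded by Pre_
def update_bal_alt (vector : List Int) (bal0 : Int) : Int :=
  let sums := pvPrefixSums vector 0
  let res := ((PySem.List.enumerate sums 0).filter (fun p => decide (bal0 < p.2))).map (·.1)
  (PySem.List.pyGet? res 0).getD 0

-- ===== PRECONDITION & SPEC =====
-- Pre_ excludes exactly the inputs (empty vector or cumulative sum never exceeding bal0) on which both Pythons raise IndexError at res[0]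
def Pre_update_bal (vector : List Int) (bal0 : Int) : Prop :=
  ∃ n ∈ List.range vector.length, bal0 < ((vector.take (n + 1)).sum)
instance (vector : List Int) (bal0 : Int) : Decidable (Pre_update_bal vector bal0) := by unfold Pre_update_bal; infer_instance
def pvWitness_update_bal : List Int × Int := ([2, 5], 3)

def Spec_update_bal (vector : List Int) (bal0 : Int) (out : Int) : Prop := out = update_bal_alt vector bal0
instance (vector : List Int) (bal0 : Int) (out : Int) : Decidable (Spec_update_bal vector bal0 out) := by unfold Spec_update_bal; infer_instance

-- ===== CLAIM (what is proved, stated in full; the proofs are below) =====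
def Claim_equal_update_bal : Prop := ∀ (vector : List Int) (bal0 : Int), Dom_update_bal vector bal0 → Pre_update_bal vector bal0 → Spec_update_bal vector bal0 (update_bal vector bal0)

-- ===== LEMMAS AND PROOFS =====

-- A's loop result is the first element of B's filtered index list (offsets generalized)
theorem pvLoopA_eq_take_one (xs : List Int) : ∀ (t i bal0 : Int),
    pvLoopA xs (bal0 - t) i =
      ((((PySem.List.enumerate (pvPrefixSums xs t) i).filter (fun p => decide (bal0 < p.2))).map (·.1)).take 1) := by
  induction xs with
  | nil => intro t i bal0; simp [pvLoopA, pvPrefixSums, PySem.List.enumerate_nil]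
  | cons x xs ih =>
    intro t i bal0
    simp only [pvLoopA, pvPrefixSums, PySem.List.enumerate_cons, List.filter_cons]
    by_cases h : bal0 < t + x
    · have h' : bal0 - t - x < 0 := by omega
      simp [h, h']
    · have h' : ¬ (bal0 - t - x < 0) := by omega
      have : bal0 - t - x = bal0 - (t + x) := by ring
      simp only [h, h', decide_eq_true_eq, if_false]
      rw [this, ih (t + x) (i + 1) bal0]

theorem update_bal_eq_alt (vector : List Int) (bal0 : Int) :
    update_bal vector bal0 = update_bal_alt vector bal0 := by
  unfold update_bal update_bal_alt
  have h := pvLoopA_eq_take_one vector 0 0 bal0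
  simp only [sub_zero] at h
  rw [h]
  simp only [PySem.List.pyGet?_zero]
  rw [List.getElem?_take_of_lt (by omega : 0 < 1)]

-- ===== VERDICT (by name: the statement is the Claim_ definition above) =====
theorem update_bal_spec : Claim_equal_update_bal := by
  intro vector bal0 _ _
  exact update_bal_eq_alt vector bal0
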